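-- pv_equiv track=rewrite | github.com/codingNoob12/algorithm-study | python/BOJ/bronze2/2022-12-17/6679.py | solve
-- ===== SOURCE A (Python) =====
-- def solve(x):
--     dec = 0 # 10
--     duoDec = 0 # 12
--     hexaDec = 0 # 16
--     for digit in str(x):
--         dec += int(digit)
--     for digit in hex(x)[2:]:
--         hexaDec += int(digit, 16)
--     while x:
--         duoDec += x % 12
--         x //= 12
--     if dec == duoDec == hexaDec:
--         return True
--     return False
-- ===== SOURCE B (Python) =====
-- def digit_sum(n, base):
--     s = 0
--     while n:
--         s += n % base
--         n //= base
--     return s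
--
--
-- def solve(x):
--     return digit_sum(x, 10) == digit_sum(x, 12) == digit_sum(x, 16)
-- ===== Notes on version B (the rewrite author's own statement) =====
-- stated objective: simpler
-- what changed: Replaces A's two string/character-iteration loops (over str(x) and hex(x)[2:]) plus one ad-hoc while loop with a single uniform arithmetic digit_sum(n, base) helper applied at the decimal, duodecimal and hexadecimal bases.
import Mathlib
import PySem

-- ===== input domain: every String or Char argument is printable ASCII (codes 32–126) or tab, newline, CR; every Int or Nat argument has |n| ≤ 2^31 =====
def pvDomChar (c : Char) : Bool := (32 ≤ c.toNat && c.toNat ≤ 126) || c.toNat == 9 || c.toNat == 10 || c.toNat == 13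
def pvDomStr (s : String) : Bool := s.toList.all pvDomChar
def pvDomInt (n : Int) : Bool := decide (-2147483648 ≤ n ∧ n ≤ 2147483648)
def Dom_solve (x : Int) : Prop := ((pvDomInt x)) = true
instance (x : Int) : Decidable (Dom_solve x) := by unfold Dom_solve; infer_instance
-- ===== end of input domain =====

-- B replaces A's two character-iteration loops and ad-hoc while loop by one uniform
-- arithmetic digit_sum helper at bases 10, 12, 16 (objective: simpler).
-- A raises ValueError for x < 0 (int('-')); those inputs are outside Pre_solve.

-- ===== PORT A =====
-- int(digit) for a single character (getD 0 is unreachable: inside Pre_ every char is a digit)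
def pyValDec (c : Char) : Int := (PySem.Int.ofChars? [c]).getD 0
-- int(digit, 16) for a single character
def pyValHex (c : Char) : Int := (PySem.Int.ofCharsBase? [c] 16).getD 0

-- hex(x)[2:] for x ≥ 0 (exact there: lowercase hex digits, no prefix;
-- for x < 0 Python has already raised in the decimal loop, outside Pre_solve)
def hexTail (n : Nat) : List Char :=
  if _h : n < 16 then [Nat.digitChar n]
  else hexTail (n / 16) ++ [Nat.digitChar (n % 16)]
decreasing_by exact Nat.div_lt_self (by omega) (by omega)

-- 'while x: duoDec += x % 12; x //= 12' — for x < 0 Python never reaches this loop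
-- (ValueError earlier); the recursion stops at x ≤ 0, which agrees on all of Pre_solve
def duoLoopA (x : Int) : Int :=
  if _h : 0 < x then PySem.Int.mod x 12 + duoLoopA (PySem.Int.floordiv x 12) else 0
termination_by x.toNat
decreasing_by
  have h12 : PySem.Int.floordiv x 12 = x / 12 := PySem.Int.floordiv_eq_ediv_of_pos (by omega)
  rw [h12]; omega

def solve (x : Int) : Bool :=
  let dec := (PySem.Int.toChars x).foldl (fun s c => s + pyValDec c) 0
  let hexaDec := (hexTail x.toNat).foldl (fun s c => s + pyValHex c) 0
  let duoDec := duoLoopA x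
  if dec = duoDec ∧ duoDec = hexaDec then true else false

-- ===== PORT B =====
-- digit_sum(n, base): while n: s += n % base; n //= base
-- (Python diverges for n < 0 or base ≤ 1; the guard stops there instead — outside Pre_solve,
-- and digit_sum is only called with base 10/12/16)
def digitSum (n : Int) (base : Int) : Int :=
  if h9 : 0 < n ∧ 1 < base then
    PySem.Int.mod n base + digitSum (PySem.Int.floordiv n base) base
  else 0
termination_by n.toNat
decreasing_by
  have e : PySem.Int.floordiv n base = ((n.toNat / base.toNat : Nat) : Int) := by
    rw [PySem.Int.floordiv_eq_ediv_of_pos (by omega), Int.natCast_ediv,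
      Int.toNat_of_nonneg (by omega : (0:Int) ≤ n), Int.toNat_of_nonneg (by omega : (0:Int) ≤ base)]
  rw [e, Int.toNat_natCast]
  exact Nat.div_lt_self (by omega) (by omega)

def solve_alt (x : Int) : Bool :=
  (digitSum x 10 == digitSum x 12) && (digitSum x 12 == digitSum x 16)

-- ===== PRECONDITION & SPEC =====
-- Pre_ excludes exactly x < 0, where A raises ValueError (int('-') on the first character of str(x))
def Pre_solve (x : Int) : Prop := 0 ≤ x
instance (x : Int) : Decidable (Pre_solve x) := by unfold Pre_solve; infer_instance
def pvWitness_solve : Int := (2)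

def Spec_solve (x : Int) (out : Bool) : Prop := out = solve_alt x
instance (x : Int) (out : Bool) : Decidable (Spec_solve x out) := by unfold Spec_solve; infer_instance

-- ===== CLAIM (what is proved, stated in full; the proofs are below) =====
def Claim_equal_solve : Prop := ∀ (x : Int), Dom_solve x → Pre_solve x → Spec_solve x (solve x)

-- ===== LEMMAS AND PROOFS =====

theorem pyValDec_digitChar (d : Nat) (hd : d < 10) : pyValDec (Nat.digitChar d) = (d : Int) := by
  interval_cases d <;> decide

theorem pyValHex_digitChar (d : Nat) (hd : d < 16) : pyValHex (Nat.digitChar d) = (d : Int) := by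
  interval_cases d <;> decide

theorem digitSum_nat (n : Nat) (base : Nat) (hb : 1 < base) (hn : 0 < n) :
    digitSum (n : Int) (base : Int) = ((n % base : Nat) : Int) + digitSum ((n / base : Nat) : Int) (base : Int) := by
  rw [digitSum, dif_pos ⟨by exact_mod_cast hn, by exact_mod_cast hb⟩]
  simp

-- A's while loop IS digit_sum at base 12
theorem duoLoopA_eq (x : Int) : duoLoopA x = digitSum x 12 := by
  induction x using duoLoopA.induct with
  | case1 x h ih =>
    rw [duoLoopA, digitSum, dif_pos h, dif_pos ⟨h, by norm_num⟩, ih]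
  | case2 x h =>
    rw [duoLoopA, digitSum, dif_neg h, dif_neg (by omega)]

-- the hex character loop IS digit_sum at base 16
theorem hexTail_sum (n : Nat) :
    ((hexTail n).map pyValHex).sum = digitSum (n : Int) 16 := by
  induction n using hexTail.induct with
  | case1 n h =>
    rw [hexTail]
    simp only [h, dif_pos, List.map_cons, List.map_nil, List.sum_cons, List.sum_nil,
      pyValHex_digitChar n h, add_zero]
    rcases Nat.eq_zero_or_pos n with h0 | h0
    · subst h0; rw [digitSum, dif_neg (by omega)]; simp
    · have hrec := digitSum_nat n 16 (by norm_num) h0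
      simp only [Nat.cast_ofNat] at hrec
      rw [hrec, Nat.div_eq_of_lt h, Nat.mod_eq_of_lt h]
      rw [digitSum, dif_neg (by omega)]
      ring
  | case2 n h ih =>
    rw [hexTail]
    rw [dif_neg h, List.map_append, List.sum_append]
    simp only [List.map_cons, List.map_nil, List.sum_cons, List.sum_nil, ih,
      pyValHex_digitChar (n % 16) (Nat.mod_lt _ (by omega))]
    have hrec := digitSum_nat n 16 (by norm_num) (by omega)
    simp only [Nat.cast_ofNat] at hrec
    rw [hrec]
    push_cast
    ring

-- the decimal character loop: Nat.toDigitsCore summed is digit_sum at base 10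
theorem toDigitsCore_sum (fuel : Nat) : ∀ (n : Nat) (ds : List Char), n < 10 ^ fuel →
    ((Nat.toDigitsCore 10 fuel n ds).map pyValDec).sum
      = digitSum (n : Int) 10 + ((ds.map pyValDec)).sum := by
  induction fuel with
  | zero =>
    intro n ds h
    interval_cases n
    rw [Nat.toDigitsCore, digitSum, dif_neg (by omega)]
    simp
  | succ f ih =>
    intro n ds h
    rw [Nat.toDigitsCore]
    rcases Nat.eq_zero_or_pos n with h0 | h0
    · subst h0
      rw [Nat.zero_div, if_pos rfl, List.map_cons, List.sum_cons]
      rw [show (0:Nat) % 10 = 0 from rfl, pyValDec_digitChar 0 (by omega)]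
      rw [digitSum, dif_neg (by omega)]
      simp
    · have hmod : pyValDec ((n % 10).digitChar) = ((n % 10 : Nat) : Int) :=
        pyValDec_digitChar _ (Nat.mod_lt _ (by omega))
      have hrec := digitSum_nat n 10 (by norm_num) h0
      simp only [Nat.cast_ofNat] at hrec
      by_cases hz : n / 10 = 0
      · rw [if_pos hz, List.map_cons, List.sum_cons, hmod, hrec, hz]
        rw [digitSum, dif_neg (by omega)]
        push_cast
        ring
      · rw [if_neg hz]
        have hlt : n / 10 < 10 ^ f := by
          have : n < 10 ^ f * 10 := by rw [← pow_succ]; exact h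
          omega
        rw [ih (n / 10) _ hlt, hrec, List.map_cons, List.sum_cons, hmod]
        push_cast
        ring

-- the decimal loop of A equals digit_sum at base 10 on Pre_
theorem decLoop_eq (x : Int) (hx : 0 ≤ x) :
    (PySem.Int.toChars x).foldl (fun s c => s + pyValDec c) 0 = digitSum x 10 := by
  rw [PySem.List.foldl_add]
  have hne : ¬ x < 0 := by omega
  rw [PySem.Int.toChars, if_neg hne, Nat.toDigits]
  rw [toDigitsCore_sum (x.toNat + 1) x.toNat []
    (lt_of_lt_of_le (Nat.lt_pow_self (by omega)) (Nat.pow_le_pow_right (by omega) (by omega)))]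
  simp only [List.map_nil, List.sum_nil, add_zero, zero_add]
  rw [Int.toNat_of_nonneg hx]

-- the hex loop of A as a foldl equals digit_sum at base 16
theorem hexLoop_eq (x : Int) (hx : 0 ≤ x) :
    (hexTail x.toNat).foldl (fun s c => s + pyValHex c) 0 = digitSum x 16 := by
  rw [PySem.List.foldl_add, zero_add, hexTail_sum, Int.toNat_of_nonneg hx]

-- ===== VERDICT (by name: the statement is the Claim_ definition above) =====
theorem solve_spec : Claim_equal_solve := by
  intro x _ hpre
  unfold Spec_solve solve solve_alt
  rw [decLoop_eq x hpre, hexLoop_eq x hpre, duoLoopA_eq]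
  by_cases h1 : digitSum x 10 = digitSum x 12 <;>
    by_cases h2 : digitSum x 12 = digitSum x 16 <;>
      simp [h1, h2, Bool.beq_eq_decide_eq]
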